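-- pv_equiv track=rewrite | github.com/vojtech-balek/pa153-natural-language-processing | statistical_methods.py | get_previous_word
-- ===== SOURCE A (Python) =====
-- def get_previous_word(text, index):
--     end_word_idx = None
--     while index > 0:
--         index -= 1
--         char = text[index]
--
--         if char.isalnum():
--             if end_word_idx is None:
--                 end_word_idx = index + 1
--         else:
--             if end_word_idx is not None:
--                 return text[index + 1: end_word_idx]
--     if end_word_idx is not None:
--         return text[0: end_word_idx]
--     return None
-- ===== SOURCE B (Python) =====
-- def get_previous_word(text, index):
--     # Forward single pass over text[0:index]: track the start of the current
--     # alnum run and the span of the most recently completed word.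
--     run_start = None
--     last = None
--     for i in range(index):
--         char = text[i]
--         if char.isalnum():
--             if run_start is None:
--                 run_start = i
--         else:
--             if run_start is not None:
--                 last = (run_start, i)
--                 run_start = None
--     if run_start is not None:
--         last = (run_start, index)
--     if last is None:
--         return None
--     return text[last[0]:last[1]]
-- ===== Notes on version B (the rewrite author's own statement) =====
-- stated objective: alternative
-- what changed: Replaces A's backward scan from index with early returns by a single forward pass over range(index) that folds a (current-run-start, last-completed-word-span) state and slices once at the end.
import Mathlib
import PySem

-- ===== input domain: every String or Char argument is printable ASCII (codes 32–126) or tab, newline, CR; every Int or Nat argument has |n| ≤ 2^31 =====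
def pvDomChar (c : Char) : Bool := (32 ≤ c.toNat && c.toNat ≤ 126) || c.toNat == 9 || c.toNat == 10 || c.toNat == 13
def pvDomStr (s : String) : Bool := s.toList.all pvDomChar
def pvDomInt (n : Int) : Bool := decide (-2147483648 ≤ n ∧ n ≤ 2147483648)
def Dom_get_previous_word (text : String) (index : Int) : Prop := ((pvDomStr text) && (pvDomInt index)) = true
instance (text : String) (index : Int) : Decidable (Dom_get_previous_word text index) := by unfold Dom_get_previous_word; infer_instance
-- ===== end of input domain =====

-- B replaces A's backward early-return scan by a forward fold of a run-tracking state; same cost, different structure.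

-- ===== PORT A =====
-- A's while-loop decrements index each iteration, so it is structural recursion on index.toNat;
-- pyGet? = none is Python's IndexError (outside Pre_).
def gpwLoopA (cs : List Char) : Nat → Option Nat → Option String
  | 0, e =>
    match e with
    | some t => some (String.ofList (PySem.List.slice cs (some 0) (some (t : Int))))
    | none => none
  | k+1, e =>
    match PySem.List.pyGet? cs (k : Int) with
    | none => none
    | some c =>
      if PySem.Chars.isalnum c then
        match e with
        | none => gpwLoopA cs k (some (k+1))
        | some t => gpwLoopA cs k (some t)
      else
        match e with
        | some t => some (String.ofList (PySem.List.slice cs (some ((k : Int)+1)) (some (t : Int))))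
        | none => gpwLoopA cs k none

def get_previous_word (text : String) (index : Int) : Option String :=
  gpwLoopA text.toList index.toNat none

-- ===== PORT B =====
-- State: (start of the currently open alnum run, span of the last completed word).
-- pyGetD's default is unreachable under Pre_ (every i in range(index) is in range).
def gpwStep (cs : List Char) (st : Option Int × Option (Int × Int)) (i : Int) :
    Option Int × Option (Int × Int) :=
  let c := PySem.List.pyGetD cs i ' '
  if PySem.Chars.isalnum c then
    match st.1 with
    | none => (some i, st.2)
    | some _ => st
  else
    match st.1 with
    | some s => (none, some (s, i))
    | none => st

def get_previous_word_alt (text : String) (index : Int) : Option String :=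
  let cs := text.toList
  let st := (PySem.List.pyRange 0 index 1).foldl (gpwStep cs) (none, none)
  let last := match st.1 with
              | some s => some (s, index)
              | none => st.2
  match last with
  | none => none
  | some (a, b) => some (String.ofList (PySem.List.slice cs (some a) (some b)))

-- ===== PRECONDITION & SPEC =====
-- Pre_ excludes exactly the inputs where Python A raises IndexError (index > len(text)); B raises there too.
def Pre_get_previous_word (text : String) (index : Int) : Prop :=
  index ≤ (text.toList.length : Int)
instance (text : String) (index : Int) : Decidable (Pre_get_previous_word text index) := by
  unfold Pre_get_previous_word; infer_instance

def pvWitness_get_previous_word : String × Int := ("hello world", 8)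

def Spec_get_previous_word (text : String) (index : Int) (out : Option String) : Prop :=
  out = get_previous_word_alt text index
instance (text : String) (index : Int) (out : Option String) : Decidable (Spec_get_previous_word text index out) := by
  unfold Spec_get_previous_word; infer_instance

-- ===== CLAIM (what is proved, stated in full; the proofs are below) =====
def Claim_equal_get_previous_word : Prop :=
  ∀ (text : String) (index : Int), Dom_get_previous_word text index →
    Pre_get_previous_word text index →
    Spec_get_previous_word text index (get_previous_word text index)

-- ===== LEMMAS AND PROOFS =====

-- character at position k (total; under the lemmas' bounds it is the real character)
def gpwAt (cs : List Char) (k : Nat) : Char := cs.getD k ' '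

-- start of the maximal alnum run extending downward from position m (exclusive)
def gpwBack (cs : List Char) : Nat → Nat
  | 0 => 0
  | k+1 => if PySem.Chars.isalnum (gpwAt cs k) then gpwBack cs k else k+1

-- B's fold state after processing the first n characters
def gpwStB (cs : List Char) (n : Nat) : Option Int × Option (Int × Int) :=
  (PySem.List.pyRange 0 (n : Int) 1).foldl (gpwStep cs) (none, none)

-- B's finishing of a recorded span
def gpwFin (cs : List Char) : Option (Int × Int) → Option String
  | none => none
  | some (a, b) => some (String.ofList (PySem.List.slice cs (some a) (some b)))

-- "an alnum run is open at n"
def gpwOpen (cs : List Char) (n : Nat) : Prop :=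
  0 < n ∧ PySem.Chars.isalnum (gpwAt cs (n-1)) = true

lemma gpwGet_eq (cs : List Char) (k : Nat) (hk : k < cs.length) :
    PySem.List.pyGet? cs (k : Int) = some (gpwAt cs k) := by
  simp [PySem.List.pyGet?_natCast, gpwAt, List.getElem?_eq_getElem hk, List.getD]

lemma gpwBack_not_open (cs : List Char) (n : Nat) (h : ¬ gpwOpen cs n) :
    gpwBack cs n = n := by
  cases n with
  | zero => rfl
  | succ k =>
    simp only [gpwBack]
    rw [if_neg]
    intro ha
    exact h ⟨Nat.succ_pos k, by simpa using ha⟩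

lemma gpwBack_succ_open (cs : List Char) (n : Nat)
    (ha : PySem.Chars.isalnum (gpwAt cs n) = true) :
    gpwBack cs (n+1) = gpwBack cs n := by
  simp [gpwBack, ha]

lemma gpwLoopA_some (cs : List Char) (t : Nat) :
    ∀ m, m ≤ cs.length →
      gpwLoopA cs m (some t) =
        some (String.ofList (PySem.List.slice cs (some ((gpwBack cs m : Nat) : Int)) (some (t : Int)))) := by
  intro m
  induction m with
  | zero => intro _; simp [gpwLoopA, gpwBack]
  | succ k ih =>
    intro hm
    rw [show gpwLoopA cs (k+1) (some t) =
      (match PySem.List.pyGet? cs (k : Int) with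
        | none => none
        | some c =>
          if PySem.Chars.isalnum c then gpwLoopA cs k (some t)
          else some (String.ofList (PySem.List.slice cs (some ((k : Int)+1)) (some (t : Int))))) from rfl]
    rw [gpwGet_eq cs k (by omega)]
    by_cases ha : PySem.Chars.isalnum (gpwAt cs k) = true
    · simp only [ha, if_true]
      rw [ih (by omega), gpwBack_succ_open cs k ha]
    · simp only [Bool.not_eq_true] at ha
      simp only [ha, Bool.false_eq_true, if_false]
      have : gpwBack cs (k+1) = k+1 := by simp [gpwBack, ha]
      rw [this]
      norm_num

lemma gpwLoopA_open (cs : List Char) (n : Nat) (hn : n ≤ cs.length) (ho : gpwOpen cs n) :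
    gpwLoopA cs n none =
      some (String.ofList (PySem.List.slice cs (some ((gpwBack cs n : Nat) : Int)) (some (n : Int)))) := by
  obtain ⟨hp, ha⟩ := ho
  obtain ⟨k, rfl⟩ : ∃ k, n = k + 1 := ⟨n - 1, by omega⟩
  simp only [Nat.add_sub_cancel] at ha
  rw [show gpwLoopA cs (k+1) none =
    (match PySem.List.pyGet? cs (k : Int) with
      | none => none
      | some c =>
        if PySem.Chars.isalnum c then gpwLoopA cs k (some (k+1))
        else gpwLoopA cs k none) from rfl]
  rw [gpwGet_eq cs k (by omega)]
  simp only [ha, if_true]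
  rw [gpwLoopA_some cs (k+1) k (by omega), gpwBack_succ_open cs k ha]

lemma gpwStB_succ (cs : List Char) (n : Nat) :
    gpwStB cs (n+1) = gpwStep cs (gpwStB cs n) (n : Int) := by
  unfold gpwStB
  have hc : ((n+1 : Nat) : Int) = (n : Int) + 1 := by push_cast; ring
  rw [hc, PySem.List.pyRange_one_succ_right (by positivity)]
  simp [List.foldl_append]

lemma gpwInv (cs : List Char) :
    ∀ n, n ≤ cs.length →
      ((gpwStB cs n).1 = none ∧ ¬ gpwOpen cs n ∧
        gpwFin cs (gpwStB cs n).2 = gpwLoopA cs n none) ∨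
      (gpwOpen cs n ∧ (gpwStB cs n).1 = some ((gpwBack cs n : Nat) : Int) ∧
        gpwFin cs (gpwStB cs n).2 = gpwLoopA cs (gpwBack cs n) none) := by
  intro n
  induction n with
  | zero =>
    intro _
    left
    refine ⟨?_, ?_, ?_⟩
    · simp [gpwStB, PySem.List.pyRange_one_eq_nil]
    · intro h; exact absurd h.1 (by omega)
    · simp [gpwStB, PySem.List.pyRange_one_eq_nil, gpwFin, gpwLoopA]
  | succ n ih =>
    intro hn
    have hlt : n < cs.length := by omega
    have hget : PySem.List.pyGetD cs (n : Int) ' ' = gpwAt cs n := by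
      simp [PySem.List.pyGetD_natCast, gpwAt]
    have hstep := gpwStB_succ cs n
    by_cases ha : PySem.Chars.isalnum (gpwAt cs n) = true
    · -- character n is alnum: run open at n+1
      have hopen : gpwOpen cs (n+1) := ⟨Nat.succ_pos n, by simpa using ha⟩
      have hback : gpwBack cs (n+1) = gpwBack cs n := gpwBack_succ_open cs n ha
      rcases ih (by omega) with ⟨h1, h2, h3⟩ | ⟨h2o, h1, h3⟩
      · right
        have hbn : gpwBack cs n = n := gpwBack_not_open cs n h2
        refine ⟨hopen, ?_, ?_⟩
        · rw [hstep]; simp [gpwStep, hget, ha, h1, hback, hbn]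
        · rw [hstep]
          simp only [gpwStep, hget, ha, if_true, h1]
          rw [hback, hbn]
          exact h3
      · right
        refine ⟨hopen, ?_, ?_⟩
        · rw [hstep]
          rcases hs : (gpwStB cs n).1 with _ | s
          · rw [h1] at hs; exact absurd hs (by simp)
          · simp [gpwStep, hget, ha, hback, ← h1, hs]
        · rw [hstep]
          rcases hs : (gpwStB cs n).1 with _ | s
          · rw [h1] at hs; exact absurd hs (by simp)
          · simp only [gpwStep, hget, ha, if_true, hs]
            rw [hback]; exact h3
    · -- character n is not alnum: no run open at n+1
      simp only [Bool.not_eq_true] at ha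
      have hnopen : ¬ gpwOpen cs (n+1) := by
        intro h
        have := h.2
        simp only [Nat.add_sub_cancel] at this
        rw [ha] at this; exact absurd this (by simp)
      have hA : gpwLoopA cs (n+1) none =
          (if PySem.Chars.isalnum (gpwAt cs n) then gpwLoopA cs n (some (n+1))
            else gpwLoopA cs n none) := by
        rw [show gpwLoopA cs (n+1) none =
          (match PySem.List.pyGet? cs (n : Int) with
            | none => none
            | some c =>
              if PySem.Chars.isalnum c then gpwLoopA cs n (some (n+1))
              else gpwLoopA cs n none) from rfl]
        rw [gpwGet_eq cs n hlt]
      rcases ih (by omega) with ⟨h1, h2, h3⟩ | ⟨h2o, h1, h3⟩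
      · left
        refine ⟨?_, hnopen, ?_⟩
        · rw [hstep]; simp [gpwStep, hget, ha, h1]
        · rw [hstep]
          simp only [gpwStep, hget, ha, Bool.false_eq_true, if_false, h1]
          rw [hA]
          simp only [ha, Bool.false_eq_true, if_false]
          exact h3
      · left
        refine ⟨?_, hnopen, ?_⟩
        · rw [hstep]; simp [gpwStep, hget, ha, h1]
        · rw [hstep]
          simp only [gpwStep, hget, ha, Bool.false_eq_true, if_false, h1]
          rw [hA]
          simp only [ha, Bool.false_eq_true, if_false]
          rw [gpwLoopA_open cs n (by omega) h2o]
          simp [gpwFin]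

-- ===== VERDICT (by name: the statement is the Claim_ definition above) =====
theorem get_previous_word_spec : Claim_equal_get_previous_word := by
  intro text index _hdom hpre
  unfold Spec_get_previous_word
  have halt : get_previous_word_alt text index =
      (match (match ((PySem.List.pyRange 0 index 1).foldl (gpwStep text.toList) (none, none)).1 with
              | some s => some (s, index)
              | none => ((PySem.List.pyRange 0 index 1).foldl (gpwStep text.toList) (none, none)).2) with
        | none => none
        | some (a, b) => some (String.ofList (PySem.List.slice text.toList (some a) (some b)))) := rfl
  rw [halt]
  unfold get_previous_word
  set cs := text.toList with hcs
  by_cases hI : index ≤ 0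
  · have h0 : index.toNat = 0 := Int.toNat_of_nonpos hI
    rw [h0, PySem.List.pyRange_one_eq_nil hI]
    simp [gpwLoopA, List.foldl]
  · have hI' : 0 < index := by omega
    obtain ⟨n, rfl⟩ : ∃ n : Nat, index = (n : Nat) := ⟨index.toNat, (Int.toNat_of_nonneg (by omega)).symm⟩
    have hn : n ≤ cs.length := by
      unfold Pre_get_previous_word at hpre
      exact_mod_cast hpre
    rw [Int.toNat_natCast]
    have hfold : (PySem.List.pyRange 0 ((n : Nat) : Int) 1).foldl (gpwStep cs) (none, none) = gpwStB cs n := rfl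
    rw [hfold]
    rcases gpwInv cs n hn with ⟨h1, _h2, h3⟩ | ⟨h2o, h1, h3⟩
    · rw [h1]
      rw [← h3]
      rcases (gpwStB cs n).2 with _ | ⟨a, b⟩ <;> simp [gpwFin]
    · rw [h1]
      rw [gpwLoopA_open cs n hn h2o]
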